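-- pv_equiv track=rewrite | github.com/liuhaos2000/uni-lh | unisv/bkapp/logic/multidim/signals.py | apply_buffer
-- ===== SOURCE A (Python) =====
-- def apply_buffer(raw_flags, entry_days=2, exit_days=1):
--     """给单个维度的 flag 序列加"状态缓冲"，进出场不对称。
--
--     - False → True（进场确认）：需要连续 entry_days 天原始 True
--     - True  → False（出场确认）：需要连续 exit_days 天原始 False
--
--     设计意图：进场要求严格以抑制抖动，出场要求宽松以快速止损/控回撤。
--     任一参数 <= 1 表示该方向不需要缓冲，立即翻转。
--     """
--     entry_days = max(1, int(entry_days))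
--     exit_days = max(1, int(exit_days))
--     if entry_days == 1 and exit_days == 1:
--         return list(raw_flags)
--     state = False
--     out = []
--     for i, r in enumerate(raw_flags):
--         if r != state:
--             need = entry_days if state is False else exit_days
--             start = i - need + 1
--             if start < 0:
--                 out.append(state)
--                 continue
--             window = raw_flags[start:i + 1]
--             if all(x != state for x in window):
--                 state = not state
--         out.append(state)
--     return out
-- ===== SOURCE B (Python) =====
-- def apply_buffer(raw_flags, entry_days=2, exit_days=1):
--     """Run-length based re-implementation: encode raw_flags into maximal runs
--     (value, length) in one scan, then process whole runs at once.  A run that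
--     matches the current state emits itself unchanged; a differing run of
--     length >= threshold emits threshold-1 old-state days followed by the
--     toggled state for the rest of the run (the toggle is confirmed exactly at
--     the threshold-th consecutive differing day); a shorter differing run never
--     confirms and emits the old state.  Runs alternate, so no partial-count
--     carries across run boundaries."""
--     entry_days = max(1, int(entry_days))
--     exit_days = max(1, int(exit_days))
--     flags = list(raw_flags)
--     if entry_days == 1 and exit_days == 1:
--         return flags
--     # run-length encode: scan forward while the value repeats
--     runs = []
--     i = 0
--     n = len(flags)
--     while i < n:
--         j = i + 1
--         while j < n and flags[j] == flags[i]: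
--             j += 1
--         runs.append((flags[i], j - i))
--         i = j
--     # process runs
--     out = []
--     state = False
--     for v, length in runs:
--         if v == state:
--             out.extend([state] * length)
--         else:
--             need = entry_days if not state else exit_days
--             if length >= need:
--                 out.extend([state] * (need - 1))
--                 out.extend([v] * (length - need + 1))
--                 state = v
--             else:
--                 out.extend([state] * length)
--     return out
-- ===== Notes on version B (the rewrite author's own statement) =====
-- stated objective: faster
-- what changed: Replaced A's per-element re-scan of a length-need window by a two-stage pass: run-length encode the flag sequence, then process whole runs at once, emitting each run's output block in one step (runs alternate, so no partial count crosses a run boundary).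
import Mathlib
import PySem

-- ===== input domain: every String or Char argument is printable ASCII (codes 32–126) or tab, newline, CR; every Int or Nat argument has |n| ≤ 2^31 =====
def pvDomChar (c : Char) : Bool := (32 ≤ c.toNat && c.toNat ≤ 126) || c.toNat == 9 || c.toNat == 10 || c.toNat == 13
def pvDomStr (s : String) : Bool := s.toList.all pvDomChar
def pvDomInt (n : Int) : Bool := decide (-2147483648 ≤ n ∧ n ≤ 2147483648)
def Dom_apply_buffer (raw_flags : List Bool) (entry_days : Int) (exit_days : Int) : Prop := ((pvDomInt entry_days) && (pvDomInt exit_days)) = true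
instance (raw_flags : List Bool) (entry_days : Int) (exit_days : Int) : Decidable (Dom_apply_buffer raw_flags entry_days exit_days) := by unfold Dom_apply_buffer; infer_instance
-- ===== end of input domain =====

-- B replaces A's per-element re-scan of a length-`need` window (O(n·k)) by a
-- two-stage O(n) pass: run-length encode the flags, then emit whole runs at once.

-- ===== PORT A =====
-- the for-loop of A: state carried through a structural recursion over enumerate(raw_flags)
def apply_buffer_loop (raw_flags : List Bool) (entry_days exit_days : Int)
    (state : Bool) (pairs : List (Int × Bool)) : List Bool :=
  match pairs with
  | [] => []
  | (i, r) :: rest =>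
    if r ≠ state then
      let need := if state = false then entry_days else exit_days
      let start := i - need + 1
      if start < 0 then
        state :: apply_buffer_loop raw_flags entry_days exit_days state rest
      else
        let window := PySem.List.slice raw_flags (some start) (some (i + 1))
        if window.all (fun x => x ≠ state) then
          (!state) :: apply_buffer_loop raw_flags entry_days exit_days (!state) rest
        else
          state :: apply_buffer_loop raw_flags entry_days exit_days state rest
    else
      state :: apply_buffer_loop raw_flags entry_days exit_days state rest

def apply_buffer (raw_flags : List Bool) (entry_days : Int) (exit_days : Int) : List Bool :=
  let entry_days := max 1 entry_days
  let exit_days := max 1 exit_days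
  if entry_days = 1 ∧ exit_days = 1 then raw_flags
  else apply_buffer_loop raw_flags entry_days exit_days false (PySem.List.enumerate raw_flags 0)

-- ===== PORT B =====
-- run-length encoding: Source B's inner while scans forward while the value repeats,
-- which is exactly takeWhile on the remaining list; the outer while resumes at j = drop
def rleRuns (flags : List Bool) : List (Bool × Nat) :=
  match flags with
  | [] => []
  | r :: rest =>
    let same := rest.takeWhile (fun y => y == r)
    (r, same.length + 1) :: rleRuns (rest.drop same.length)
  termination_by flags.length
  decreasing_by simp

-- the second for-loop of Source B: one output block per run
def emitRuns (entry_days exit_days : Int) (state : Bool) (runs : List (Bool × Nat)) : List Bool :=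
  match runs with
  | [] => []
  | (v, length) :: rest =>
    if v = state then
      List.replicate length state ++ emitRuns entry_days exit_days state rest
    else
      let need := if !state then entry_days else exit_days
      if (length : Int) ≥ need then
        List.replicate (need.toNat - 1) state ++
          List.replicate (length - need.toNat + 1) v ++
          emitRuns entry_days exit_days v rest
      else
        List.replicate length state ++ emitRuns entry_days exit_days state rest

def apply_buffer_alt (raw_flags : List Bool) (entry_days : Int) (exit_days : Int) : List Bool :=
  let entry_days := max 1 entry_days
  let exit_days := max 1 exit_days
  if entry_days = 1 ∧ exit_days = 1 then raw_flags
  else emitRuns entry_days exit_days false (rleRuns raw_flags)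

-- ===== PRECONDITION & SPEC =====
def Spec_apply_buffer (raw_flags : List Bool) (entry_days : Int) (exit_days : Int) (out : List Bool) : Prop := out = apply_buffer_alt raw_flags entry_days exit_days
instance (raw_flags : List Bool) (entry_days : Int) (exit_days : Int) (out : List Bool) : Decidable (Spec_apply_buffer raw_flags entry_days exit_days out) := by unfold Spec_apply_buffer; infer_instance

-- ===== CLAIM (what is proved, stated in full; the proofs are below) =====
def Claim_equal_apply_buffer : Prop := ∀ (raw_flags : List Bool) (entry_days : Int) (exit_days : Int), Dom_apply_buffer raw_flags entry_days exit_days → Spec_apply_buffer raw_flags entry_days exit_days (apply_buffer raw_flags entry_days exit_days)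

-- ===== LEMMAS AND PROOFS =====

-- proof-side intermediate: a single pass with a running counter of consecutive
-- differing values; we show A's loop equals it, and then that it equals B's run pass
def bufLoop (entry_days exit_days : Int) (state : Bool) (run : Int) (flags : List Bool) : List Bool :=
  match flags with
  | [] => []
  | r :: rest =>
    if r ≠ state then
      let run := run + 1
      if run ≥ (if !state then entry_days else exit_days) then
        (!state) :: bufLoop entry_days exit_days (!state) 0 rest
      else
        state :: bufLoop entry_days exit_days state run rest
    else
      state :: bufLoop entry_days exit_days state 0 rest

-- length of the maximal suffix of l whose elements are all b
def suffixRun (l : List Bool) (b : Bool) : Nat :=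
  (l.reverse.takeWhile (fun x => x == b)).length

theorem suffixRun_nil (b : Bool) : suffixRun [] b = 0 := rfl

theorem suffixRun_le (l : List Bool) (b : Bool) : suffixRun l b ≤ l.length := by
  have := (List.takeWhile_sublist (p := fun x => x == b) (l := l.reverse)).length_le
  simpa [suffixRun] using this

theorem suffixRun_append_single (l : List Bool) (r b : Bool) :
    suffixRun (l ++ [r]) b = if r == b then suffixRun l b + 1 else 0 := by
  simp [suffixRun, List.takeWhile_cons]
  split <;> simp_all

theorem take_all_iff (l : List Bool) (p : Bool → Bool) (k : Nat) (hk : k ≤ l.length) :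
    ((l.take k).all p = true) ↔ k ≤ (l.takeWhile p).length := by
  induction l generalizing k with
  | nil => simp at hk; simp [hk]
  | cons a t ih =>
    cases k with
    | zero => simp
    | succ k' =>
      simp only [List.take_succ_cons, List.all_cons, List.takeWhile_cons]
      by_cases hp : p a = true
      · simp only [hp, Bool.true_and, if_true, List.length_cons]
        rw [ih k' (by simpa using hk)]
        omega
      · simp [hp]

theorem drop_suffix_all (l : List Bool) (b : Bool) (k : Nat) (hk : k ≤ l.length) :
    ((l.drop (l.length - k)).all (fun x => x == b) = true) ↔ k ≤ suffixRun l b := by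
  have hrev : (l.drop (l.length - k)).reverse = l.reverse.take k := by
    rw [List.reverse_drop]
    congr 1
    omega
  have hall : (l.drop (l.length - k)).all (fun x => x == b)
      = (l.reverse.take k).all (fun x => x == b) := by
    rw [← hrev, List.all_reverse]
  rw [hall]
  exact take_all_iff l.reverse _ k (by simpa using hk)

theorem loop_eq (e x : Int) (he : 1 ≤ e) (hx : 1 ≤ x) (rest : List Bool) :
    ∀ (pre : List Bool) (state : Bool) (run : Int),
    run = (suffixRun pre (!state) : Int) →
    run < (if state = false then e else x) →
    apply_buffer_loop (pre ++ rest) e x state (PySem.List.enumerate rest (pre.length : Int)) =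
      bufLoop e x state run rest := by
  induction rest with
  | nil => intro pre state run _ _; simp [apply_buffer_loop, bufLoop]
  | cons r rest' ih =>
    intro pre state run hrun hlt
    rw [PySem.List.enumerate_cons]
    simp only [apply_buffer_loop, bufLoop]
    by_cases hr : r = state
    · -- r == state: both emit state, B resets the counter
      subst hr
      simp only [ne_eq, not_true_eq_false, if_false]
      have hnext := ih (pre ++ [r]) r 0
        (by simp [suffixRun_append_single])
        (by split <;> omega)
      simp only [List.length_append, List.length_cons, List.length_nil] at hnext
      rw [show (pre ++ r :: rest') = (pre ++ [r]) ++ rest' by simp]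
      rw [show ((pre.length : Int) + 1) = ((pre.length + 1 : Nat) : Int) by omega]
      rw [hnext]
    · -- r ≠ state
      have hr' : r = !state := by cases r <;> cases state <;> simp_all
      simp only [ne_eq, hr, not_false_eq_true, if_true]
      set need : Int := if state = false then e else x with hneed
      have hneedB : (if !state then e else x) = need := by cases state <;> simp [hneed]
      have hneed1 : 1 ≤ need := by rw [hneed]; split <;> omega
      have hrunnn : (0:Int) ≤ run := by rw [hrun]; positivity
      have hsle : suffixRun pre (!state) ≤ pre.length := suffixRun_le _ _
      rw [hneedB]
      -- the window condition of A ↔ the counter condition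
      have hkey : ((pre.length : Int) - need + 1 < 0 → ¬ (run + 1 ≥ need)) ∧
          (¬ ((pre.length : Int) - need + 1 < 0) →
            ((PySem.List.slice (pre ++ r :: rest') (some ((pre.length : Int) - need + 1))
                (some ((pre.length : Int) + 1))).all (fun y => y ≠ state) = true ↔ run + 1 ≥ need)) := by
        constructor
        · intro hneg
          have : (pre.length : Int) < need - 1 := by omega
          rw [hrun]
          omega
        · intro hpos
          have hd : ∃ d : Nat, need = (d : Int) ∧ 1 ≤ d := by
            refine ⟨need.toNat, ?_, ?_⟩ <;> omega
          obtain ⟨d, hdeq, hd1⟩ := hd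
          have hdlen : d - 1 ≤ pre.length := by omega
          have hstart : ((pre.length : Int) - need + 1) = ((pre.length + 1 - d : Nat) : Int) := by
            omega
          have hstop : ((pre.length : Int) + 1) = ((pre.length + 1 : Nat) : Int) := by omega
          rw [hstart, hstop, PySem.List.slice_natCast]
          have hdropapp : (pre ++ r :: rest').drop (pre.length + 1 - d)
              = pre.drop (pre.length + 1 - d) ++ r :: rest' := by
            rw [List.drop_append_of_le_length (by omega)]
          have hlendrop : (pre.drop (pre.length + 1 - d)).length = d - 1 := by
            simp; omega
          have htake : ((pre ++ r :: rest').drop (pre.length + 1 - d)).take (pre.length + 1 - (pre.length + 1 - d))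
              = pre.drop (pre.length + 1 - d) ++ [r] := by
            rw [hdropapp, List.take_append, hlendrop]
            have h1 : pre.length + 1 - (pre.length + 1 - d) = d := by omega
            have h2 : d - (d - 1) = 1 := by omega
            rw [h1, h2]
            simp [List.take_of_length_le (by omega : (pre.drop (pre.length + 1 - d)).length ≤ d)]
          rw [htake]
          have hrall : (fun y => decide ¬ (y = state)) = (fun y => y == !state) := by
            funext y; cases y <;> cases state <;> simp
          rw [List.all_append]
          simp only [hrall]
          have hlast : ([r].all (fun y => y == !state)) = true := by simp [hr']
          rw [hlast, Bool.and_true]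
          have hpp : pre.length + 1 - d = pre.length - (d - 1) := by omega
          rw [hpp, drop_suffix_all pre (!state) (d - 1) hdlen]
          rw [hrun, hdeq]
          omega
      by_cases hs : (pre.length : Int) - need + 1 < 0
      · rw [if_pos hs, if_neg (hkey.1 hs)]
        have hnext := ih (pre ++ [r]) state (run + 1)
          (by rw [hrun]; simp [suffixRun_append_single, hr'])
          (by rw [hneedB] at *; have := hkey.1 hs; omega)
        simp only [List.length_append, List.length_cons, List.length_nil] at hnext
        rw [show (pre ++ r :: rest') = (pre ++ [r]) ++ rest' by simp,
          show ((pre.length : Int) + 1) = ((pre.length + 1 : Nat) : Int) by omega]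
        rw [hnext]
      · rw [if_neg hs]
        have hiff := hkey.2 hs
        by_cases hw : run + 1 ≥ need
        · rw [if_pos (hiff.mpr hw), if_pos hw]
          have hnext := ih (pre ++ [r]) (!state) 0
            (by simp [suffixRun_append_single, hr'])
            (by cases state <;> simp <;> omega)
          simp only [List.length_append, List.length_cons, List.length_nil] at hnext
          rw [show (pre ++ r :: rest') = (pre ++ [r]) ++ rest' by simp,
            show ((pre.length : Int) + 1) = ((pre.length + 1 : Nat) : Int) by omega]
          rw [hnext]
        · rw [if_neg (fun h => hw (hiff.mp h)), if_neg hw]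
          have hnext := ih (pre ++ [r]) state (run + 1)
            (by rw [hrun]; simp [suffixRun_append_single, hr'])
            (by rw [hneedB] at *; omega)
          simp only [List.length_append, List.length_cons, List.length_nil] at hnext
          rw [show (pre ++ r :: rest') = (pre ++ [r]) ++ rest' by simp,
            show ((pre.length : Int) + 1) = ((pre.length + 1 : Nat) : Int) by omega]
          rw [hnext]

-- the counter loop ignores the incoming counter when the head matches the state
theorem bufLoop_head_match (e x : Int) (s : Bool) (run run' : Int) (tail : List Bool)
    (h : tail.head? ≠ some (!s)) :
    bufLoop e x s run tail = bufLoop e x s run' tail := by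
  cases tail with
  | nil => rfl
  | cons a t =>
    have ha : a = s := by cases a <;> cases s <;> simp_all
    subst ha
    simp [bufLoop]

-- a block matching the state passes through unchanged, counter 0
theorem bufLoop_same (e x : Int) (s : Bool) (k : Nat) (tail : List Bool) :
    bufLoop e x s 0 (List.replicate k s ++ tail) =
      List.replicate k s ++ bufLoop e x s 0 tail := by
  induction k with
  | zero => simp
  | succ n ih => simp [List.replicate_succ, bufLoop, ih]

-- a differing block too short to confirm: counter accumulates, state holds
theorem bufLoop_diff_lt (e x : Int) (s : Bool) (k : Nat) (tail : List Bool) :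
    ∀ run : Int, 0 ≤ run → run + k < (if !s then e else x) →
    bufLoop e x s run (List.replicate k (!s) ++ tail) =
      List.replicate k s ++ bufLoop e x s (run + k) tail := by
  induction k with
  | zero => intro run _ _; simp
  | succ n ih =>
    intro run hrun hlt
    have hne : (!s) ≠ s := by cases s <;> simp
    simp only [List.replicate_succ, List.cons_append, bufLoop, ne_eq, hne,
      not_false_eq_true, if_true]
    rw [if_neg (by push_cast at hlt ⊢; omega)]
    rw [ih (run + 1) (by omega) (by push_cast at hlt ⊢; omega),
      show run + 1 + (n : Int) = run + ((n + 1 : Nat) : Int) by push_cast; ring]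

-- a differing block long enough to confirm: threshold-1 old-state days, then toggle
theorem bufLoop_diff_ge (e x : Int) (s : Bool) (L : Nat) (tail : List Bool)
    (need : Int) (hneeddef : need = if !s then e else x)
    (hneed1 : 1 ≤ need) (hge : need ≤ (L : Int)) :
    bufLoop e x s 0 (List.replicate L (!s) ++ tail) =
      List.replicate (need.toNat - 1) s ++
        (List.replicate (L - need.toNat + 1) (!s) ++
          bufLoop e x (!s) 0 tail) := by
  have hd : ∃ d : Nat, need = (d : Int) ∧ 1 ≤ d ∧ d ≤ L := ⟨need.toNat, by omega, by omega, by omega⟩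
  obtain ⟨d, hdeq, hd1, hdL⟩ := hd
  have hsplit : List.replicate L (!s) =
      List.replicate (d - 1) (!s) ++ (!s) :: List.replicate (L - d) (!s) := by
    have hLd : L = (d - 1) + ((L - d) + 1) := by omega
    conv_lhs => rw [hLd]
    rw [List.replicate_add, List.replicate_succ]
  rw [hsplit, List.append_assoc]
  rw [bufLoop_diff_lt e x s (d - 1) _ 0 le_rfl (by rw [← hneeddef, hdeq]; omega)]
  have hne : (!s) ≠ s := by cases s <;> simp
  simp only [List.cons_append, bufLoop, ne_eq, hne, not_false_eq_true, if_true]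
  rw [if_pos (by rw [← hneeddef, hdeq]; omega)]
  rw [bufLoop_same e x (!s) (L - d) tail]
  have hdnat : need.toNat = d := by omega
  rw [hdnat]
  simp [List.replicate_succ]

-- dropping the first run's length is dropWhile
theorem drop_length_takeWhile_bool (p : Bool → Bool) (l : List Bool) :
    l.drop (l.takeWhile p).length = l.dropWhile p := by
  induction l with
  | nil => rfl
  | cons a t ih => by_cases h : p a <;> simp [h, ih]

-- the head of what rleRuns recurses on never repeats the previous run's value
theorem head_dropWhile_ne (r : Bool) (rest : List Bool) :
    (rest.drop (rest.takeWhile (fun y => y == r)).length).head? ≠ some r := by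
  induction rest with
  | nil => simp
  | cons a t ih =>
    by_cases ha : a = r
    · simpa [ha] using ih
    · simp [ha]

-- decomposition used by rleRuns: a list is its first run plus the remainder
theorem cons_eq_run_append (r : Bool) (rest : List Bool) :
    r :: rest = List.replicate ((rest.takeWhile (fun y => y == r)).length + 1) r ++
      rest.drop (rest.takeWhile (fun y => y == r)).length := by
  have htw : rest.takeWhile (fun y => y == r) =
      List.replicate (rest.takeWhile (fun y => y == r)).length r := by
    apply List.eq_replicate_of_mem
    intro b hb
    have := List.mem_takeWhile_imp hb
    simpa using this
  calc r :: rest = r :: (rest.takeWhile (fun y => y == r) ++ rest.dropWhile (fun y => y == r)) := by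
        rw [List.takeWhile_append_dropWhile]
    _ = _ := by
        rw [List.replicate_succ, List.cons_append]
        congr 1
        rw [drop_length_takeWhile_bool, ← htw]

-- the counter pass equals B's run-based pass
theorem bufLoop_eq_emitRuns (e x : Int) (he : 1 ≤ e) (hx : 1 ≤ x) :
    ∀ (n : Nat) (l : List Bool), l.length ≤ n → ∀ s : Bool,
    bufLoop e x s 0 l = emitRuns e x s (rleRuns l) := by
  intro n
  induction n with
  | zero =>
    intro l hl s
    have : l = [] := List.eq_nil_of_length_eq_zero (by omega)
    subst this
    simp [bufLoop, rleRuns, emitRuns]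
  | succ m ih =>
    intro l hl s
    match l with
    | [] => simp [bufLoop, rleRuns, emitRuns]
    | r :: rest =>
      have hrle : rleRuns (r :: rest) =
          (r, (rest.takeWhile (fun y => y == r)).length + 1) ::
            rleRuns (rest.drop (rest.takeWhile (fun y => y == r)).length) := by
        rw [rleRuns]
      set L : Nat := (rest.takeWhile (fun y => y == r)).length + 1 with hL
      set tail : List Bool := rest.drop (rest.takeWhile (fun y => y == r)).length with htl
      have hdec : r :: rest = List.replicate L r ++ tail := cons_eq_run_append r rest
      have htail_len : tail.length ≤ m := by
        rw [htl, List.length_drop]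
        simp only [List.length_cons] at hl
        omega
      have hhead : tail.head? ≠ some r := head_dropWhile_ne r rest
      rw [hrle, hdec]
      by_cases hr : r = s
      · -- matching run
        subst hr
        rw [bufLoop_same e x r L tail, ih tail htail_len r]
        simp [emitRuns]
      · -- differing run
        have hr' : r = !s := by cases r <;> cases s <;> simp_all
        subst hr'
        obtain ⟨need, hneeddef⟩ : ∃ nd : Int, nd = if !s then e else x := ⟨_, rfl⟩
        have hneed1 : 1 ≤ need := by rw [hneeddef]; split <;> omega
        simp only [emitRuns]
        rw [if_neg (by cases s <;> simp), ← hneeddef]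
        by_cases hge : (L : Int) ≥ need
        · rw [if_pos hge, bufLoop_diff_ge e x s L tail need hneeddef hneed1 hge,
            ih tail htail_len (!s)]
          simp [List.append_assoc]
        · rw [if_neg hge]
          rw [bufLoop_diff_lt e x s L tail 0 le_rfl (by rw [← hneeddef]; omega)]
          rw [bufLoop_head_match e x s ((0 : Int) + L) 0 tail hhead]
          rw [ih tail htail_len s]

-- ===== VERDICT (by name: the statement is the Claim_ definition above) =====
theorem apply_buffer_spec : Claim_equal_apply_buffer := by
  intro raw e x _
  unfold Spec_apply_buffer apply_buffer apply_buffer_alt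
  by_cases hg : max 1 e = 1 ∧ max 1 x = 1
  · simp [hg]
  · simp only [hg, if_false]
    have h1 := loop_eq (max 1 e) (max 1 x) (le_max_left _ _) (le_max_left _ _) raw [] false 0
      (by simp [suffixRun_nil]) (by split <;> omega)
    have h2 := bufLoop_eq_emitRuns (max 1 e) (max 1 x) (le_max_left _ _) (le_max_left _ _)
      raw.length raw le_rfl false
    simpa [h2] using h1
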